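-- pv_equiv track=rewrite | github.com/wyk18703232953/myResearch | codeComplex/data copy/filteredData/python/cubic/python_cubic_0118.py | generate_test_case
-- ===== SOURCE A (Python) =====
-- def generate_test_case(case_index, n):
--     # Deterministically generate s and t based on n and case_index
--     # Let |t| = max(1, n // 2), |s| = n
--     if n <= 0:
--         return "a", "a"
--     len_t = max(1, n // 2)
--     len_s = n
--
--     alphabet = ["a", "b", "c"]
--
--     def char_from_idx(idx):
--         return alphabet[(idx + case_index) % len(alphabet)]
--
--     s = [char_from_idx(i) for i in range(len_s)]
--     t = [alphabet[(i * 2 + case_index) % len(alphabet)] for i in range(len_t)]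
--     return "".join(s), "".join(t)
-- ===== SOURCE B (Python) =====
-- def generate_test_case(case_index, n):
--     # Build each string by tiling a 3-character base pattern (both strings are
--     # periodic with period 3) instead of computing a character per index.
--     if n <= 0:
--         return "a", "a"
--     len_t = max(1, n // 2)
--     alphabet = "abc"
--     base_s = "".join(alphabet[(j + case_index) % 3] for j in range(3))
--     base_t = "".join(alphabet[(2 * j + case_index) % 3] for j in range(3))
--     s = (base_s * (n // 3 + 1))[:n]
--     t = (base_t * (len_t // 3 + 1))[:len_t]
--     return s, t
-- ===== Notes on version B (the rewrite author's own statement) =====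
-- stated objective: faster
-- what changed: Instead of evaluating a modular index expression for every character, B computes each 3-character base pattern once and builds the strings by repeating the pattern and slicing to length (period-3 tiling).
import Mathlib
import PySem

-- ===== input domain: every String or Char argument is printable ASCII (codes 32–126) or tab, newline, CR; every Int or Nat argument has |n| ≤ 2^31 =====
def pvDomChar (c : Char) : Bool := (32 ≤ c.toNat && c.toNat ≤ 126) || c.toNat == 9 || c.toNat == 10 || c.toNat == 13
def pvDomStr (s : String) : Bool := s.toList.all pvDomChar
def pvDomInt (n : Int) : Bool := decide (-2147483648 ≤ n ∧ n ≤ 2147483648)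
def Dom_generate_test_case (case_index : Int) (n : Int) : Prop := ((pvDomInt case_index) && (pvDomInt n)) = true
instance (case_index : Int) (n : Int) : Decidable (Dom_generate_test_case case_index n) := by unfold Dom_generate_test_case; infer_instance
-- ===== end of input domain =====

-- B builds each string by tiling a 3-character base pattern (both strings are
-- periodic with period 3) instead of computing a modular index per character.


-- ===== PORT A =====
-- literal transliteration of A; the list index (idx + case_index) % 3 is always
-- in range (Python mod of a positive divisor is in [0,3)), so the `.getD` totality
-- default is never used.
def generate_test_case (case_index : Int) (n : Int) : String × String :=
  if n ≤ 0 then ("a", "a")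
  else
    let len_t : Int := max 1 (PySem.Int.floordiv n 2)
    let len_s : Int := n
    let alphabet : List String := ["a", "b", "c"]
    let char_from_idx : Int → String := fun idx =>
      (PySem.List.pyGet? alphabet (PySem.Int.mod (idx + case_index) (PySem.List.len alphabet))).getD ""
    let s : List String := (PySem.List.pyRange 0 len_s 1).map (fun i => char_from_idx i)
    let t : List String := (PySem.List.pyRange 0 len_t 1).map (fun i =>
      (PySem.List.pyGet? alphabet (PySem.Int.mod (i * 2 + case_index) (PySem.List.len alphabet))).getD "")
    (PySem.Str.join "" s, PySem.Str.join "" t)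

-- ===== PORT B =====
-- transliteration of Source B; the base patterns are kept as their character lists
-- (a join of 1-character strings is exactly its character list), string
-- repetition `base * k` is `(List.replicate k base).flatten`, `[:m]` is slice.
def generate_test_case_alt (case_index : Int) (n : Int) : String × String :=
  if n ≤ 0 then ("a", "a")
  else
    let len_t : Int := max 1 (PySem.Int.floordiv n 2)
    let alphabet : String := "abc"
    let base_s : List Char := (PySem.List.pyRange 0 3 1).map (fun j =>
      (PySem.Str.pyGet? alphabet (PySem.Int.mod (j + case_index) 3)).getD 'a')
    let base_t : List Char := (PySem.List.pyRange 0 3 1).map (fun j =>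
      (PySem.Str.pyGet? alphabet (PySem.Int.mod (2 * j + case_index) 3)).getD 'a')
    let s : List Char :=
      PySem.List.slice ((List.replicate (PySem.Int.floordiv n 3 + 1).toNat base_s).flatten) none (some n)
    let t : List Char :=
      PySem.List.slice ((List.replicate (PySem.Int.floordiv len_t 3 + 1).toNat base_t).flatten) none (some len_t)
    (String.ofList s, String.ofList t)

-- ===== PRECONDITION & SPEC =====
def Spec_generate_test_case (case_index : Int) (n : Int) (out : String × String) : Prop := out = generate_test_case_alt case_index n
instance (case_index : Int) (n : Int) (out : String × String) : Decidable (Spec_generate_test_case case_index n out) := by unfold Spec_generate_test_case; infer_instance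

-- ===== CLAIM (what is proved, stated in full; the proofs are below) =====
def Claim_equal_generate_test_case : Prop := ∀ (case_index : Int) (n : Int), Dom_generate_test_case case_index n → Spec_generate_test_case case_index n (generate_test_case case_index n)

-- ===== LEMMAS AND PROOFS =====

-- A's list index and B's string index pick the same character, as a 1-char string.
lemma elemA (x : Int) :
    ((PySem.List.pyGet? (["a", "b", "c"] : List String) (PySem.Int.mod x 3)).getD "").toList
      = [(PySem.Str.pyGet? "abc" (PySem.Int.mod x 3)).getD 'a'] := by
  rw [PySem.Int.mod_eq_emod_of_pos (by norm_num)]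
  have h : x % 3 = 0 ∨ x % 3 = 1 ∨ x % 3 = 2 := by omega
  rcases h with h | h | h <;> rw [h] <;> decide

-- tiling a period-3 function: k copies of its first three values are its first 3*k values
lemma tile (g : Nat → Char) (hper : ∀ i, g (i + 3) = g i) (k : Nat) :
    (List.replicate k [g 0, g 1, g 2]).flatten = (List.range (3 * k)).map g := by
  induction k with
  | zero => simp
  | succ k ih =>
      rw [List.replicate_succ, List.flatten_cons, ih,
        show 3 * (k + 1) = 3 + 3 * k by ring, List.range_add, List.map_append, List.map_map]
      have h2 : List.map (g ∘ fun x => 3 + x) (List.range (3 * k))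
          = List.map g (List.range (3 * k)) :=
        List.map_congr_left fun i _ => by
          simp only [Function.comp_apply]; rw [Nat.add_comm]; exact hper i
      rw [h2, show List.map g (List.range 3) = [g 0, g 1, g 2] from rfl]

-- the shared per-string fact, for step = 1 (s) and step = 2 (t)
lemma key (c step L : Int) (hL : 1 ≤ L) :
    PySem.Str.join "" ((PySem.List.pyRange 0 L 1).map (fun i =>
        (PySem.List.pyGet? (["a", "b", "c"] : List String)
          (PySem.Int.mod (i * step + c) (PySem.List.len (["a", "b", "c"] : List String)))).getD ""))
      = String.ofList (PySem.List.slice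
          ((List.replicate (PySem.Int.floordiv L 3 + 1).toNat
            ((PySem.List.pyRange 0 3 1).map (fun j =>
              (PySem.Str.pyGet? "abc" (PySem.Int.mod (step * j + c) 3)).getD 'a'))).flatten)
          none (some L)) := by
  apply String.toList_inj.mp
  set g : Int → Char := fun x => (PySem.Str.pyGet? "abc" (PySem.Int.mod x 3)).getD 'a' with hg
  have hper : ∀ x : Int, g (x + 3 * step) = g x := by
    intro x
    simp only [hg, PySem.Int.mod_eq_emod_of_pos (show (0:Int) < 3 by norm_num),
      Int.add_mul_emod_self_left]
  -- left side: join of singleton strings = the character list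
  have hL0 : PySem.List.len (["a", "b", "c"] : List String) = 3 := by decide
  rw [hL0, PySem.List.pyRange_one]
  simp only [PySem.Str.toList_join, List.map_map]
  rw [show ((List.range (L - 0).toNat).map
      ((fun s : String => s.toList) ∘ ((fun i =>
        (PySem.List.pyGet? (["a", "b", "c"] : List String)
          (PySem.Int.mod (i * step + c) 3)).getD "") ∘ fun k : Nat => (0 : Int) + ↑k)))
      = ((List.range (L - 0).toNat).map (fun k : Nat => g (step * ↑k + c))).map (fun ch => [ch]) by
    rw [List.map_map]
    exact List.map_congr_left (fun k _ => by
      simpa [hg, mul_comm, zero_add] using elemA ((k : Int) * step + c))]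
  rw [show ("" : String).toList = ([] : List Char) by rfl, PySem.Chars.join_nil_singletons]
  -- right side
  have h3 : PySem.List.pyRange 0 3 1 = [0, 1, 2] := by decide
  rw [String.toList_ofList, h3]
  have hbase : ([(0:Int), 1, 2].map (fun j =>
      (PySem.Str.pyGet? "abc" (PySem.Int.mod (step * j + c) 3)).getD 'a'))
      = [(fun k : Nat => g (step * ↑k + c)) 0, (fun k : Nat => g (step * ↑k + c)) 1,
         (fun k : Nat => g (step * ↑k + c)) 2] := by
    simp [hg]
  rw [hbase, tile (fun k : Nat => g (step * ↑k + c))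
      (fun i => by
        have heq : step * ((i : Int) + 3) + c = (step * (i : Int) + c) + 3 * step := by ring
        simpa [heq] using hper (step * (i : Int) + c))]
  have hslice := PySem.List.slice_to
    (List.map (fun k : Nat => g (step * ↑k + c))
      (List.range (3 * (PySem.Int.floordiv L 3 + 1).toNat)))
    (b := L) (by omega)
  rw [hslice, ← List.map_take, List.take_range]
  have hq : PySem.Int.floordiv L 3 = L / 3 := PySem.Int.floordiv_eq_ediv_of_pos (by norm_num)
  have hmin : min L.toNat (3 * (PySem.Int.floordiv L 3 + 1).toNat) = L.toNat := by
    rw [hq]; omega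
  rw [hmin]
  simp

-- ===== VERDICT (by name: the statement is the Claim_ definition above) =====
theorem generate_test_case_spec : Claim_equal_generate_test_case := by
  intro c n _
  unfold Spec_generate_test_case generate_test_case generate_test_case_alt
  by_cases hn : n ≤ 0
  · simp [hn]
  · simp only [hn, if_false]
    have h1 : (1 : Int) ≤ n := by omega
    have h2 : (1 : Int) ≤ max 1 (PySem.Int.floordiv n 2) := le_max_left _ _
    refine Prod.ext ?_ ?_
    · simpa [mul_one, one_mul] using key c 1 n h1
    · simpa using key c 2 (max 1 (PySem.Int.floordiv n 2)) h2
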